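-- pv_equiv track=rewrite | github.com/VeronicaPistolesi/lavAstar | utils.py | cost_computation
-- ===== SOURCE A (Python) =====
-- def cost_computation(grid, grid_colors, solution_path):
--     cost = 0
--     for state in solution_path:
--         x, y = state
--         terrain_type = grid[y][x]
--         terrain_color = grid_colors[y][x]
--
--         if terrain_type == ord('.') and terrain_color == 6:  #Ice cell
--             cost += 3
--         else:
--             cost += 1
--     return cost
-- ===== SOURCE B (Python) =====
-- def cost_computation(grid, grid_colors, solution_path):
--     def ice(state):
--         x, y = state
--         return grid[y][x] == ord('.') and grid_colors[y][x] == 6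
--
--     def go(path):
--         if not path:
--             return 0
--         if len(path) == 1:
--             return 3 if ice(path[0]) else 1
--         m = len(path) // 2
--         return go(path[:m]) + go(path[m:])
--
--     return go(solution_path)
-- ===== Notes on version B (the rewrite author's own statement) =====
-- stated objective: alternative
-- what changed: B computes the total by divide-and-conquer: it recursively splits the path in half and adds the two halves' costs, with the ice/non-ice test only at singleton leaves, instead of A's left-to-right conditional accumulator loop.
import Mathlib
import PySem

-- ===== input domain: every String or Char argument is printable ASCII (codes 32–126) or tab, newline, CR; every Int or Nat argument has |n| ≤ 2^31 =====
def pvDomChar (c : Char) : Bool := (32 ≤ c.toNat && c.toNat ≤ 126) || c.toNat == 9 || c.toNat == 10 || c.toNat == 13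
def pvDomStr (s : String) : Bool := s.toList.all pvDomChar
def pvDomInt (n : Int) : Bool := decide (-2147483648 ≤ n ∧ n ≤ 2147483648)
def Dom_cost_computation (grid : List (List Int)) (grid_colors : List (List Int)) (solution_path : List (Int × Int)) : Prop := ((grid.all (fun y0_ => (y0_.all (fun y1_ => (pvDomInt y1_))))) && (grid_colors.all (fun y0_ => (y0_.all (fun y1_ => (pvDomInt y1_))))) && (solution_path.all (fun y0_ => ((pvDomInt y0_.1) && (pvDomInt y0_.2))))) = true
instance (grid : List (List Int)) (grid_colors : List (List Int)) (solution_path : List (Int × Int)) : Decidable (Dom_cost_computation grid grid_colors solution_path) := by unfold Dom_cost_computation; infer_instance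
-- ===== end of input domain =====

-- B totals the path cost by divide-and-conquer over the path (recursive halving, ice test at leaves) instead of A's left-to-right conditional accumulator (objective: alternative).

-- ===== PORT A =====
-- A: cost = 0; for (x,y) in path: cost += 3 if grid[y][x]==ord('.') and grid_colors[y][x]==6 else 1
def cost_computation (grid : List (List Int)) (grid_colors : List (List Int)) (solution_path : List (Int × Int)) : Int :=
  solution_path.foldl (fun cost state =>
    let x := state.1
    let y := state.2
    let terrain_type := PySem.List.pyGetD (PySem.List.pyGetD grid y []) x 0
    let terrain_color := PySem.List.pyGetD (PySem.List.pyGetD grid_colors y []) x 0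
    if terrain_type = 46 ∧ terrain_color = 6 then cost + 3 else cost + 1) 0

-- ===== PORT B =====
-- B's helper ice(state): grid[y][x]==ord('.') and grid_colors[y][x]==6
def pvIce (grid : List (List Int)) (grid_colors : List (List Int)) (state : Int × Int) : Bool :=
  let x := state.1
  let y := state.2
  PySem.List.pyGetD (PySem.List.pyGetD grid y []) x 0 == 46 &&
  PySem.List.pyGetD (PySem.List.pyGetD grid_colors y []) x 0 == 6

-- B's go(path): divide-and-conquer.  path[:m] / path[m:] with 0 ≤ m ≤ len(path) are exactly
-- List.take m / List.drop m, and path[0] on a singleton is headI (exact on this domain).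
def pvGo (grid : List (List Int)) (grid_colors : List (List Int)) (path : List (Int × Int)) : Int :=
  if path = [] then 0
  else if path.length = 1 then (if pvIce grid grid_colors path.headI then 3 else 1)
  else
    let m := path.length / 2
    pvGo grid grid_colors (path.take m) + pvGo grid grid_colors (path.drop m)
termination_by path.length
decreasing_by
  · rename_i h1 h2
    have hne : path.length ≠ 0 := fun h => h1 (List.length_eq_zero_iff.mp h)
    rw [List.length_take]; omega
  · rename_i h1 h2
    have hne : path.length ≠ 0 := fun h => h1 (List.length_eq_zero_iff.mp h)
    rw [List.length_drop]; omega
def cost_computation_alt (grid : List (List Int)) (grid_colors : List (List Int)) (solution_path : List (Int × Int)) : Int :=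
  pvGo grid grid_colors solution_path

-- ===== PRECONDITION & SPEC =====
-- Pre_: every path cell's indices are valid Python indices into grid and grid_colors (else A raises IndexError).
def Pre_cost_computation (grid : List (List Int)) (grid_colors : List (List Int)) (solution_path : List (Int × Int)) : Prop :=
  ∀ s ∈ solution_path,
    PySem.Raise.InRange grid.length s.2 ∧
    PySem.Raise.InRange (PySem.List.pyGetD grid s.2 []).length s.1 ∧
    PySem.Raise.InRange grid_colors.length s.2 ∧
    PySem.Raise.InRange (PySem.List.pyGetD grid_colors s.2 []).length s.1
instance (grid : List (List Int)) (grid_colors : List (List Int)) (solution_path : List (Int × Int)) : Decidable (Pre_cost_computation grid grid_colors solution_path) := by unfold Pre_cost_computation; infer_instance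
def pvWitness_cost_computation : List (List Int) × List (List Int) × (List (Int × Int)) := ([[46, 47], [46, 46]], [[6, 1], [2, 6]], [(0, 0), (1, 1), (1, 0)])

def Spec_cost_computation (grid : List (List Int)) (grid_colors : List (List Int)) (solution_path : List (Int × Int)) (out : Int) : Prop := out = cost_computation_alt grid grid_colors solution_path
instance (grid : List (List Int)) (grid_colors : List (List Int)) (solution_path : List (Int × Int)) (out : Int) : Decidable (Spec_cost_computation grid grid_colors solution_path out) := by unfold Spec_cost_computation; infer_instance

-- ===== CLAIM (what is proved, stated in full; the proofs are below) =====
def Claim_equal_cost_computation : Prop := ∀ (grid : List (List Int)) (grid_colors : List (List Int)) (solution_path : List (Int × Int)), Dom_cost_computation grid grid_colors solution_path → Pre_cost_computation grid grid_colors solution_path → Spec_cost_computation grid grid_colors solution_path (cost_computation grid grid_colors solution_path)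

-- ===== LEMMAS AND PROOFS =====
-- the per-cell step cost both programs realise
def pvStep (grid : List (List Int)) (grid_colors : List (List Int)) (s : Int × Int) : Int :=
  if pvIce grid grid_colors s then 3 else 1

-- A's fold from accumulator c equals c + sum of step costs.
theorem cost_fold_eq (grid grid_colors : List (List Int)) (l : List (Int × Int)) (c : Int) :
    l.foldl (fun cost state =>
      let x := state.1
      let y := state.2
      let terrain_type := PySem.List.pyGetD (PySem.List.pyGetD grid y []) x 0
      let terrain_color := PySem.List.pyGetD (PySem.List.pyGetD grid_colors y []) x 0
      if terrain_type = 46 ∧ terrain_color = 6 then cost + 3 else cost + 1) c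
      = c + (l.map (pvStep grid grid_colors)).sum := by
  induction l generalizing c with
  | nil => simp
  | cons a t ih =>
    simp only [List.foldl_cons, List.map_cons, List.sum_cons, ih, pvStep, pvIce]
    by_cases h1 : PySem.List.pyGetD (PySem.List.pyGetD grid a.2 []) a.1 0 = 46 <;>
    by_cases h2 : PySem.List.pyGetD (PySem.List.pyGetD grid_colors a.2 []) a.1 0 = 6 <;>
      simp [h1, h2] <;> ring

-- B's divide-and-conquer equals the same sum of step costs.
theorem pvGo_eq_sum (grid grid_colors : List (List Int)) (l : List (Int × Int)) :
    pvGo grid grid_colors l = (l.map (pvStep grid grid_colors)).sum := by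
  induction l using pvGo.induct grid grid_colors with
  | case1 => simp [pvGo]
  | case2 x h1 h2 hice =>
    obtain ⟨a, ha⟩ := List.length_eq_one_iff.mp h2
    subst ha
    simp [pvGo, pvStep]
  | case3 x h1 h2 hice =>
    obtain ⟨a, ha⟩ := List.length_eq_one_iff.mp h2
    subst ha
    simp [pvGo, pvStep]
  | case4 x h1 h2 m ih1 ih2 =>
    rw [pvGo, if_neg h1, if_neg h2]
    show pvGo grid grid_colors (x.take (x.length / 2)) + pvGo grid grid_colors (x.drop (x.length / 2)) = _
    rw [ih1, ih2, ← List.sum_append, ← List.map_append, List.take_append_drop]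

-- ===== VERDICT (by name: the statement is the Claim_ definition above) =====
theorem cost_computation_spec : Claim_equal_cost_computation := by
  intro grid grid_colors solution_path _ _
  unfold Spec_cost_computation cost_computation cost_computation_alt
  rw [cost_fold_eq, pvGo_eq_sum, zero_add]
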